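-- pv_equiv track=rewrite | github.com/DimasBenasulin/Curso_Python_CISCO_ACAD | Ejercicios/misfunciones.py | dias_en_el_mes
-- ===== SOURCE A (Python) =====
-- def bisiesto(anio):
--     if (anio % 400 == 0) or (anio % 4 == 0 and anio % 100 != 0):
--         return True
--     else:
--         return False
--
-- def dias_en_el_mes(anio, mes):
--     normal = [31,28,31,30,31,30,31,31,30,31,30,31]
--     bisiestos = normal[:]
--     bisiestos[1] = 29
--     dias = 0
--     if bisiesto(anio):
--         for i in range(mes):
--             dias += bisiestos[i]
--     else:
--         for i in range(mes):
--             dias += normal[i]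
--
--     return dias
-- ===== SOURCE B (Python) =====
-- def bisiesto(anio):
--     if (anio % 400 == 0) or (anio % 4 == 0 and anio % 100 != 0):
--         return True
--     else:
--         return False
--
-- def dias_en_el_mes(anio, mes):
--     cum = [0, 31, 59, 90, 120, 151, 181, 212, 243, 273, 304, 334, 365]
--     if mes < 1:
--         return 0
--     return cum[mes] + (1 if bisiesto(anio) and mes > 1 else 0)
-- ===== Notes on version B (the rewrite author's own statement) =====
-- stated objective: simpler
-- what changed: Replaces the per-month summation loop over a month-length table with a precomputed cumulative prefix array and a single lookup plus a leap-day adjustment when February is included.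
import Mathlib
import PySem

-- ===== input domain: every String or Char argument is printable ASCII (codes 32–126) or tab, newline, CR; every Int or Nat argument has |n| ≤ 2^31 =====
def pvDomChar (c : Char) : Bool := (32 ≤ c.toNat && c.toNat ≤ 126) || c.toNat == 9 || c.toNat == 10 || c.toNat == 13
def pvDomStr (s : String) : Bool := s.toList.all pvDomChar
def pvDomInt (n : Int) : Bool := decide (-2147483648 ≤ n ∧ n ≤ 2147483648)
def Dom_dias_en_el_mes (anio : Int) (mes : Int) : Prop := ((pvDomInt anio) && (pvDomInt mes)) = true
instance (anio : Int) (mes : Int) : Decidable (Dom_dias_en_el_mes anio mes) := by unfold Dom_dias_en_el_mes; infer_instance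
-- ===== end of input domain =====

-- B replaces A's per-month summation loop with a constant cumulative prefix table
-- and a single lookup plus a leap-day adjustment (objective: simpler).

-- ===== PORT A =====
def bisiesto (anio : Int) : Bool :=
  if (PySem.Int.mod anio 400 == 0) || (PySem.Int.mod anio 4 == 0 && PySem.Int.mod anio 100 != 0) then
    true
  else
    false

def dias_en_el_mes (anio : Int) (mes : Int) : Int :=
  let normal : List Int := [31,28,31,30,31,30,31,31,30,31,30,31]
  let bisiestos : List Int := (normal.take normal.length).set 1 29
  if bisiesto anio then
    (PySem.List.pyRange 0 mes 1).foldl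
      (fun dias i => dias + (PySem.List.pyGet? bisiestos i).getD 0) 0
  else
    (PySem.List.pyRange 0 mes 1).foldl
      (fun dias i => dias + (PySem.List.pyGet? normal i).getD 0) 0

-- ===== PORT B =====
def dias_en_el_mes_alt (anio : Int) (mes : Int) : Int :=
  let cum : List Int := [0,31,59,90,120,151,181,212,243,273,304,334,365]
  if mes < 1 then 0
  else (PySem.List.pyGet? cum mes).getD 0 + (if bisiesto anio && decide (mes > 1) then 1 else 0)

-- ===== PRECONDITION & SPEC =====
-- Pre_ excludes mes > 12, where both Pythons raise IndexError (out-of-range month index).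
def Pre_dias_en_el_mes (anio : Int) (mes : Int) : Prop := mes ≤ 12
instance (anio : Int) (mes : Int) : Decidable (Pre_dias_en_el_mes anio mes) := by unfold Pre_dias_en_el_mes; infer_instance
def pvWitness_dias_en_el_mes : Int × Int := (2024, 3)

def Spec_dias_en_el_mes (anio : Int) (mes : Int) (out : Int) : Prop := out = dias_en_el_mes_alt anio mes
instance (anio : Int) (mes : Int) (out : Int) : Decidable (Spec_dias_en_el_mes anio mes out) := by unfold Spec_dias_en_el_mes; infer_instance

-- ===== CLAIM (what is proved, stated in full; the proofs are below) =====
def Claim_equal_dias_en_el_mes : Prop := ∀ (anio : Int) (mes : Int), Dom_dias_en_el_mes anio mes → Pre_dias_en_el_mes anio mes → Spec_dias_en_el_mes anio mes (dias_en_el_mes anio mes)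

-- ===== LEMMAS AND PROOFS =====
lemma pyRange_nonpos (a b : Int) (h : b ≤ a) : PySem.List.pyRange a b 1 = [] := by
  rw [PySem.List.pyRange_one]
  have : (b - a).toNat = 0 := by omega
  simp [this]

-- ===== VERDICT (by name: the statement is the Claim_ definition above) =====
theorem dias_en_el_mes_spec : Claim_equal_dias_en_el_mes := by
  intro anio mes _ hpre
  unfold Spec_dias_en_el_mes Pre_dias_en_el_mes at *
  by_cases hlt : mes < 1
  · have h := pyRange_nonpos 0 mes (by omega)
    simp [dias_en_el_mes, dias_en_el_mes_alt, h, hlt]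
  · have h1 : (1:Int) ≤ mes := by omega
    interval_cases mes <;> cases hb : bisiesto anio <;>
      simp [dias_en_el_mes, dias_en_el_mes_alt, hb] <;> decide
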